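-- pv_equiv track=rewrite | github.com/aidanmatchette/CodeForces | A/Tram.py | solve
-- ===== SOURCE A (Python) =====
-- def solve(passengers):
--     max_pass = 0
--
--     curr = 0
--
--     for stop in passengers:
--         leave, entry = stop
--         curr -= leave
--         curr += entry
--
--         max_pass = max(max_pass, curr)
--     return max_pass
-- ===== SOURCE B (Python) =====
-- def solve(passengers):
--     # Right-to-left scan: best = maximum over prefixes (incl. empty) of the
--     # remaining stops of the net passenger change; no running count, no max tracking.
--     best = 0
--     for leave, entry in reversed(passengers):
--         best = max(0, entry - leave + best)
--     return best
-- ===== Notes on version B (the rewrite author's own statement) =====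
-- stated objective: alternative
-- what changed: Replaced the forward loop that tracks both a running passenger count and a running maximum by a single backward scan maintaining only the best prefix-sum of the remaining stops (Kadane-style recurrence max(0, delta + best)).
import Mathlib
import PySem

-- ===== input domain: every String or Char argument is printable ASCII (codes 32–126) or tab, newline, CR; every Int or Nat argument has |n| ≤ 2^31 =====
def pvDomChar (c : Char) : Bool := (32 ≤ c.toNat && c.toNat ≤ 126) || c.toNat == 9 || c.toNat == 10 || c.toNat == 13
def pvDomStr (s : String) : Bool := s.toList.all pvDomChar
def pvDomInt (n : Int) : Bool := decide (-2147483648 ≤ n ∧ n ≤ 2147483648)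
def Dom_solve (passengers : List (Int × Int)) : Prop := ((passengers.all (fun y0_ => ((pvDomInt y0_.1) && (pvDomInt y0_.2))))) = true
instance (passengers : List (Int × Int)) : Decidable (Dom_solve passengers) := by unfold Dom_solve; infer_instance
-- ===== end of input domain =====

-- B replaces A's forward loop (running count + running max) with a backward scan of
-- the best prefix-sum of the remaining stops; same O(n) cost, different invariant.


-- ===== PORT A =====
-- literal port: fold over stops with state (max_pass, curr)
def solve (passengers : List (Int × Int)) : Int :=
  (passengers.foldl
    (fun s stop =>
      let curr := s.2 - stop.1 + stop.2
      (max s.1 curr, curr))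
    (0, 0)).1

-- ===== PORT B =====
-- literal port of Source B: backward loop, best = max(0, entry - leave + best)
def solve_alt (passengers : List (Int × Int)) : Int :=
  passengers.reverse.foldl (fun best stop => max 0 (stop.2 - stop.1 + best)) 0

-- ===== PRECONDITION & SPEC =====
def Spec_solve (passengers : List (Int × Int)) (out : Int) : Prop := out = solve_alt passengers
instance (passengers : List (Int × Int)) (out : Int) : Decidable (Spec_solve passengers out) := by unfold Spec_solve; infer_instance

-- ===== CLAIM (what is proved, stated in full; the proofs are below) =====
def Claim_equal_solve : Prop := ∀ (passengers : List (Int × Int)), Dom_solve passengers → Spec_solve passengers (solve passengers)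

-- ===== LEMMAS AND PROOFS =====

-- B's recurrence as a foldr
def bestG (stop : Int × Int) (b : Int) : Int := max 0 (stop.2 - stop.1 + b)

theorem bestG_nonneg : ∀ (ps : List (Int × Int)), 0 ≤ ps.foldr bestG 0 := by
  intro ps
  induction ps with
  | nil => simp
  | cons p t ih => simp [bestG]

theorem solve_alt_eq_foldr (ps : List (Int × Int)) :
    solve_alt ps = ps.foldr bestG 0 := by
  simp only [solve_alt, List.foldl_reverse]
  rfl

theorem foldA_eq (ps : List (Int × Int)) : ∀ (m c : Int), c ≤ m →
    (ps.foldl (fun s stop =>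
        let curr := s.2 - stop.1 + stop.2
        (max s.1 curr, curr)) (m, c)).1 = max m (c + ps.foldr bestG 0) := by
  induction ps with
  | nil => intro m c h; simp; omega
  | cons p t ih =>
      intro m c h
      have hF := bestG_nonneg t
      simp only [List.foldl_cons, List.foldr_cons]
      rw [ih (max m (c - p.1 + p.2)) (c - p.1 + p.2) (le_max_right _ _)]
      simp [bestG]
      omega

-- ===== VERDICT (by name: the statement is the Claim_ definition above) =====

theorem solve_spec : Claim_equal_solve := by
  intro ps _
  unfold Spec_solve
  have := foldA_eq ps 0 0 (le_refl 0)
  have hF := bestG_nonneg ps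
  rw [solve_alt_eq_foldr]
  unfold solve
  omega
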